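-- pv_equiv track=rewrite | github.com/pair0/Programmers | 연습문제/LV0/로그인 성공.py | solution
-- ===== SOURCE A (Python) =====
-- def solution(id_pw, db):
--     answer = ''
--     flag = 0
--
--     if id_pw in db:
--         answer = "login"
--     else:
--         for i in db:
--             if id_pw[0] == i[0]:
--                 flag = 1
--         if flag == 1:
--             answer = "wrong pw"
--         else:
--             answer = "fail"
--     return answer
-- ===== SOURCE B (Python) =====
-- def solution(id_pw, db):
--     found_id = False
--     for i in db:
--         if i == id_pw:
--             return "login"
--         if i[:1] == id_pw[:1]:
--             found_id = True
--     return "wrong pw" if found_id else "fail"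
-- ===== Notes on version B (the rewrite author's own statement) =====
-- stated objective: simpler
-- what changed: B replaces A's separate membership scan plus a second flag-setting loop over db with one early-returning pass that checks the exact pair and tracks an id-match flag simultaneously.
import Mathlib
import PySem

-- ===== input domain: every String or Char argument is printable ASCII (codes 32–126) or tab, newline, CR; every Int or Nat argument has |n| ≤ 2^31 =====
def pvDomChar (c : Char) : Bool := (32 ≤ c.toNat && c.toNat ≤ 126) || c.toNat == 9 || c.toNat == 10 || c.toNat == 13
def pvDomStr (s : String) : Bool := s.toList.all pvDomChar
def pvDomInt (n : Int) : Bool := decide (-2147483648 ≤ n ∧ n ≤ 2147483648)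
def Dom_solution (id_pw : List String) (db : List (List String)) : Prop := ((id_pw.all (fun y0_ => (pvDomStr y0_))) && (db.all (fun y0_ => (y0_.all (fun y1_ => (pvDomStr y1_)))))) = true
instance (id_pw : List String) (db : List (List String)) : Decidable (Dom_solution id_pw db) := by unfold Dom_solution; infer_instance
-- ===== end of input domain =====

-- B merges A's membership scan and flag-setting loop into one early-returning pass (simpler, same cost).


-- ===== PORT A =====
-- membership test, then a second loop setting flag when id_pw[0] == i[0]
def solution (id_pw : List String) (db : List (List String)) : String :=
  if id_pw ∈ db then "login"
  else
    let flag : Int :=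
      db.foldl (fun flag i =>
        if PySem.List.pyGet? id_pw 0 = PySem.List.pyGet? i 0 then 1 else flag) 0
    if flag = 1 then "wrong pw" else "fail"

-- ===== PORT B =====
-- single early-returning pass; i[:1] == id_pw[:1] ported as take 1 (slice with nonnegative bounds)
def solutionAltGo (id_pw : List String) (found : Bool) : List (List String) → String
  | [] => if found then "wrong pw" else "fail"
  | i :: rest =>
    if i = id_pw then "login"
    else solutionAltGo id_pw (found || (i.take 1 = id_pw.take 1)) rest

def solution_alt (id_pw : List String) (db : List (List String)) : String :=
  solutionAltGo id_pw false db

-- ===== PRECONDITION & SPEC =====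
-- Pre_ excludes exactly the inputs where A raises IndexError on id_pw[0] or i[0].
def Pre_solution (id_pw : List String) (db : List (List String)) : Prop :=
  id_pw ∈ db ∨ (id_pw = [] ∧ db = []) ∨ (id_pw ≠ [] ∧ [] ∉ db)
instance (id_pw : List String) (db : List (List String)) : Decidable (Pre_solution id_pw db) := by unfold Pre_solution; infer_instance

def pvWitness_solution : List String × List (List String) :=
  (["a", "x"], [["a", "y"], ["b", "x"]])

def Spec_solution (id_pw : List String) (db : List (List String)) (out : String) : Prop := out = solution_alt id_pw db
instance (id_pw : List String) (db : List (List String)) (out : String) : Decidable (Spec_solution id_pw db out) := by unfold Spec_solution; infer_instance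

-- ===== CLAIM (what is proved, stated in full; the proofs are below) =====
def Claim_equal_solution : Prop := ∀ (id_pw : List String) (db : List (List String)), Dom_solution id_pw db → Pre_solution id_pw db → Spec_solution id_pw db (solution id_pw db)

-- ===== LEMMAS AND PROOFS =====

lemma solutionAltGo_mem (id_pw : List String) (db : List (List String)) (found : Bool)
    (h : id_pw ∈ db) : solutionAltGo id_pw found db = "login" := by
  induction db generalizing found with
  | nil => cases h
  | cons i rest ih =>
    simp only [solutionAltGo]
    rcases List.mem_cons.mp h with h1 | h1
    · simp [h1.symm]
    · split_ifs with he
      · rfl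
      · exact ih _ h1

lemma solutionAltGo_not_mem (id_pw : List String) (a : String) (tl : List String)
    (hid : id_pw = a :: tl) (db : List (List String))
    (hmem : id_pw ∉ db) (hnil : [] ∉ db) (found : Bool) :
    solutionAltGo id_pw found db =
      (if (db.foldl (fun flag i =>
          if PySem.List.pyGet? id_pw 0 = PySem.List.pyGet? i 0 then (1 : Int) else flag)
          (if found then 1 else 0)) = 1 then "wrong pw" else "fail") := by
  induction db generalizing found with
  | nil =>
    cases found <;> simp [solutionAltGo]
  | cons i rest ih =>
    have hine : i ≠ id_pw := fun h => hmem (h ▸ List.mem_cons_self)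
    obtain ⟨b, tl', hi⟩ : ∃ b tl', i = b :: tl' := by
      match i, hnil with
      | b :: tl', _ => exact ⟨b, tl', rfl⟩
      | [], hnil => exact absurd List.mem_cons_self hnil
    have hmem' : id_pw ∉ rest := fun h => hmem (List.mem_cons_of_mem _ h)
    have hnil' : ([] : List String) ∉ rest := fun h => hnil (List.mem_cons_of_mem _ h)
    simp only [solutionAltGo, if_neg hine, List.foldl_cons]
    rw [ih hmem' hnil' (found || (i.take 1 = id_pw.take 1))]
    congr 1
    subst hid hi
    simp only [PySem.List.pyGet?, PySem.List.pyIdx?]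
    by_cases hab : a = b
    · subst hab
      simp
    · have h1 : ¬ ((a :: tl).take 1 = (a :: tl').take 1 ∧ True) ∨ True := by simp
      simp [List.take, hab, Ne.symm hab]

-- ===== VERDICT (by name: the statement is the Claim_ definition above) =====
theorem solution_spec : Claim_equal_solution := by
  intro id_pw db _ hpre
  unfold Spec_solution solution solution_alt
  by_cases hmem : id_pw ∈ db
  · rw [if_pos hmem, solutionAltGo_mem _ _ _ hmem]
  · rw [if_neg hmem]
    rcases hpre with h | ⟨h1, h2⟩ | ⟨h1, h2⟩
    · exact absurd h hmem
    · subst h1 h2; simp [solutionAltGo]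
    · obtain ⟨a, tl, hid⟩ : ∃ a tl, id_pw = a :: tl := by
        cases id_pw with
        | nil => exact absurd rfl h1
        | cons a tl => exact ⟨a, tl, rfl⟩
      rw [solutionAltGo_not_mem id_pw a tl hid db hmem h2 false]
      simp
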